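-- pv_equiv track=rewrite | github.com/cullejam/weather_kalshi | daily_run.py | parse_rank_metrics
-- ===== SOURCE A (Python) =====
-- def parse_rank_metrics(rank_output: str) -> dict:
--     metrics = {"scanned": None, "passed": None, "safe_recommended": None}
--     for line in rank_output.splitlines():
--         stripped = line.strip()
--         if stripped.startswith("Markets scanned:"):
--             try:
--                 metrics["scanned"] = int(stripped.split(":", 1)[1].strip())
--             except Exception:
--                 pass
--         elif stripped.startswith("Markets passing filters:"):
--             try:
--                 metrics["passed"] = int(stripped.split(":", 1)[1].strip())
--             except Exception:
--                 pass
--         elif stripped.startswith("Safe recommended candidates:"):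
--             try:
--                 metrics["safe_recommended"] = int(stripped.split(":", 1)[1].strip())
--             except Exception:
--                 pass
--     return metrics
-- ===== SOURCE B (Python) =====
-- def parse_rank_metrics(rank_output: str) -> dict:
--     lines = [line.strip() for line in rank_output.splitlines()]
--
--     def last_value(prefix):
--         # last matching line wins, so search back-to-front and return the first
--         # occurrence that parses; parse failures are skipped like A's except-pass
--         for stripped in reversed(lines):
--             if stripped.startswith(prefix):
--                 try:
--                     return int(stripped.split(":", 1)[1].strip())
--                 except ValueError:
--                     continue
--         return None
--
--     return {
--         "scanned": last_value("Markets scanned:"),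
--         "passed": last_value("Markets passing filters:"),
--         "safe_recommended": last_value("Safe recommended candidates:"),
--     }
-- ===== Notes on version B (the rewrite author's own statement) =====
-- stated objective: alternative
-- what changed: Instead of A's single forward pass that mutates a dict through an if/elif chain, B searches the reversed line list once per metric with an early-returning helper (first successfully-parsed match from the end = A's last overwrite), building the result dict in one literal.
import Mathlib
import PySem

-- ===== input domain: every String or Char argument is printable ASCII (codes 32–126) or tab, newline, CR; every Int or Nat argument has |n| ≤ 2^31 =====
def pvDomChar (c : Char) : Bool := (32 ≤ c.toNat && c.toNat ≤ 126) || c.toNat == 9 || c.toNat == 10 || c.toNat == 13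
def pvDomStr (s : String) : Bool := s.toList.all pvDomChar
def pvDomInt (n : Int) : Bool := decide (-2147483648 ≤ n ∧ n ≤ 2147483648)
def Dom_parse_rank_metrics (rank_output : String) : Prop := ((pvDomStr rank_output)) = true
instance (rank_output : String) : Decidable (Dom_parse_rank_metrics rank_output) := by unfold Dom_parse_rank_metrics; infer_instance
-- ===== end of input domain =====

-- B replaces A's forward dict-mutating if/elif pass by one backward early-return
-- search per metric (objective: alternative); same return value on every input.

-- ===== PORT A =====
-- literal transliteration of A: one forward pass mutating the dict via an if/elif chain
def parse_rank_metrics (rank_output : String) : List (String × Option Int) :=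
  let metrics : PySem.Dict String (Option Int) :=
    PySem.Dict.ofList [("scanned", none), ("passed", none), ("safe_recommended", none)]
  let metrics :=
    (PySem.Str.splitlines rank_output).foldl (fun m line =>
      let stripped := PySem.Str.strip line
      if PySem.Str.startswith stripped "Markets scanned:" then
        -- try: metrics["scanned"] = int(stripped.split(":",1)[1].strip()) except Exception: pass
        match (PySem.Str.splitMax? stripped ":" 1).bind
                (fun parts => PySem.List.pyGet? parts 1) with
        | none => m          -- IndexError caught by `except Exception: pass`
        | some part =>
          match PySem.Int.ofStr? (PySem.Str.strip part) with
          | none => m        -- ValueError caught by `except Exception: pass`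
          | some v => m.insert "scanned" (some v)
      else if PySem.Str.startswith stripped "Markets passing filters:" then
        match (PySem.Str.splitMax? stripped ":" 1).bind
                (fun parts => PySem.List.pyGet? parts 1) with
        | none => m
        | some part =>
          match PySem.Int.ofStr? (PySem.Str.strip part) with
          | none => m
          | some v => m.insert "passed" (some v)
      else if PySem.Str.startswith stripped "Safe recommended candidates:" then
        match (PySem.Str.splitMax? stripped ":" 1).bind
                (fun parts => PySem.List.pyGet? parts 1) with
        | none => m
        | some part =>
          match PySem.Int.ofStr? (PySem.Str.strip part) with
          | none => m
          | some v => m.insert "safe_recommended" (some v)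
      else m) metrics
  metrics.items

-- ===== PORT B =====
-- Source B's `last_value` helper: walk the reversed stripped lines, return the first
-- successfully-parsed match (parse failures continue, like the except/continue)
def pvLastValue (pfx : String) : List String → Option Int
  | [] => none
  | s :: rest =>
    if PySem.Str.startswith s pfx then
      match (PySem.Str.splitMax? s ":" 1).bind
              (fun parts => PySem.List.pyGet? parts 1) with
      | none => pvLastValue pfx rest   -- unreachable: a matched prefix contains ':'
      | some part =>
        match PySem.Int.ofStr? (PySem.Str.strip part) with
        | some v => some v             -- early `return`
        | none => pvLastValue pfx rest -- ValueError → continue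
    else pvLastValue pfx rest

def parse_rank_metrics_alt (rank_output : String) : List (String × Option Int) :=
  let lines := (PySem.Str.splitlines rank_output).map PySem.Str.strip
  [("scanned", pvLastValue "Markets scanned:" lines.reverse),
   ("passed", pvLastValue "Markets passing filters:" lines.reverse),
   ("safe_recommended", pvLastValue "Safe recommended candidates:" lines.reverse)]

-- ===== PRECONDITION & SPEC =====
def Spec_parse_rank_metrics (rank_output : String) (out : List (String × Option Int)) : Prop := out = parse_rank_metrics_alt rank_output
instance (rank_output : String) (out : List (String × Option Int)) : Decidable (Spec_parse_rank_metrics rank_output out) := by unfold Spec_parse_rank_metrics; infer_instance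

-- ===== CLAIM (what is proved, stated in full; the proofs are below) =====
def Claim_equal_parse_rank_metrics : Prop := ∀ (rank_output : String), Dom_parse_rank_metrics rank_output → Spec_parse_rank_metrics rank_output (parse_rank_metrics rank_output)

-- ===== LEMMAS AND PROOFS =====

-- what one stripped line contributes for one prefix (none = no match or parse failure)
def pvHit (pfx s : String) : Option Int :=
  if PySem.Str.startswith s pfx then
    match (PySem.Str.splitMax? s ":" 1).bind (fun parts => PySem.List.pyGet? parts 1) with
    | none => none
    | some part => PySem.Int.ofStr? (PySem.Str.strip part)
  else none

theorem pvLastValue_cons (pfx s : String) (rest : List String) :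
    pvLastValue pfx (s :: rest) = (pvHit pfx s).or (pvLastValue pfx rest) := by
  simp only [pvLastValue, pvHit]
  split_ifs with hs
  · rcases h : (PySem.Str.splitMax? s ":" 1).bind (fun parts => PySem.List.pyGet? parts 1) with _ | part
    · simp
    · rcases h2 : PySem.Int.ofStr? (PySem.Str.strip part) with _ | v <;> simp [h2]
  · simp

theorem pvLastValue_nil (pfx : String) : pvLastValue pfx [] = none := rfl

theorem pvLastValue_append (pfx : String) (l₁ l₂ : List String) :
    pvLastValue pfx (l₁ ++ l₂) = (pvLastValue pfx l₁).or (pvLastValue pfx l₂) := by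
  induction l₁ with
  | nil => simp [pvLastValue_nil]
  | cons s rest ih => simp [pvLastValue_cons, ih, Option.or_assoc]

-- the backward search equals a forward "last some wins" fold
theorem foldl_or_eq_lastValue (pfx : String) (l : List String) (acc : Option Int) :
    l.foldl (fun a s => (pvHit pfx s).or a) acc = (pvLastValue pfx l.reverse).or acc := by
  induction l generalizing acc with
  | nil => simp [pvLastValue_nil]
  | cons s rest ih =>
      simp [List.reverse_cons, pvLastValue_append, pvLastValue_cons, pvLastValue_nil, ih,
        Option.or_assoc]

-- prefix exclusivity: no string starts with two of the three prefixes
theorem pv_excl (s p q : String) (hpq : ¬ (p.toList <+: q.toList) ∧ ¬ (q.toList <+: p.toList))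
    (hp : PySem.Str.startswith s p = true) : PySem.Str.startswith s q = false := by
  by_contra h
  have hq : PySem.Str.startswith s q = true := by
    cases hq : PySem.Str.startswith s q <;> simp_all
  rw [PySem.Str.startswith_eq, PySem.Chars.startswith_iff] at hp hq
  rcases le_total p.toList.length q.toList.length with hle | hle
  · exact hpq.1 (List.prefix_of_prefix_length_le hp hq hle)
  · exact hpq.2 (List.prefix_of_prefix_length_le hq hp hle)

-- A's loop body as a named function (definitionally equal to the lambda in the port)
def pvStepA (m : PySem.Dict String (Option Int)) (line : String) :
    PySem.Dict String (Option Int) :=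
  let stripped := PySem.Str.strip line
  if PySem.Str.startswith stripped "Markets scanned:" then
    match (PySem.Str.splitMax? stripped ":" 1).bind
            (fun parts => PySem.List.pyGet? parts 1) with
    | none => m
    | some part =>
      match PySem.Int.ofStr? (PySem.Str.strip part) with
      | none => m
      | some v => m.insert "scanned" (some v)
  else if PySem.Str.startswith stripped "Markets passing filters:" then
    match (PySem.Str.splitMax? stripped ":" 1).bind
            (fun parts => PySem.List.pyGet? parts 1) with
    | none => m
    | some part =>
      match PySem.Int.ofStr? (PySem.Str.strip part) with
      | none => m
      | some v => m.insert "passed" (some v)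
  else if PySem.Str.startswith stripped "Safe recommended candidates:" then
    match (PySem.Str.splitMax? stripped ":" 1).bind
            (fun parts => PySem.List.pyGet? parts 1) with
    | none => m
    | some part =>
      match PySem.Int.ofStr? (PySem.Str.strip part) with
      | none => m
      | some v => m.insert "safe_recommended" (some v)
  else m

-- one step of A on the 3-entry dict = an Option.or update of each slot
theorem pv_stepA_mk (line : String) (a b c : Option Int) :
    pvStepA (PySem.Dict.mk [("scanned", a), ("passed", b), ("safe_recommended", c)]) line
    = PySem.Dict.mk
        [("scanned", (pvHit "Markets scanned:" (PySem.Str.strip line)).or a),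
         ("passed", (pvHit "Markets passing filters:" (PySem.Str.strip line)).or b),
         ("safe_recommended", (pvHit "Safe recommended candidates:" (PySem.Str.strip line)).or c)] := by
  unfold pvStepA
  set s := PySem.Str.strip line with hs
  by_cases h1 : PySem.Str.startswith s "Markets scanned:" = true
  · have h2 := pv_excl s "Markets scanned:" "Markets passing filters:" (by decide) h1
    have h3 := pv_excl s "Markets scanned:" "Safe recommended candidates:" (by decide) h1
    simp only [pvHit, h1, h2, h3, if_true, Bool.false_eq_true, if_false]
    rcases hsp : (PySem.Str.splitMax? s ":" 1).bind (fun parts => PySem.List.pyGet? parts 1) with _ | part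
    · simp
    · rcases hv : PySem.Int.ofStr? (PySem.Str.strip part) with _ | v
      · simp [hv]
      · simp only [hv, Option.some_or]
        rfl
  · by_cases h2 : PySem.Str.startswith s "Markets passing filters:" = true
    · have h3 := pv_excl s "Markets passing filters:" "Safe recommended candidates:" (by decide) h2
      simp only [pvHit, h1, h2, h3, if_true, Bool.false_eq_true, if_false]
      rcases hsp : (PySem.Str.splitMax? s ":" 1).bind (fun parts => PySem.List.pyGet? parts 1) with _ | part
      · simp
      · rcases hv : PySem.Int.ofStr? (PySem.Str.strip part) with _ | v
        · simp [hv]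
        · simp only [hv, Option.some_or]
          rfl
    · by_cases h3 : PySem.Str.startswith s "Safe recommended candidates:" = true
      · simp only [pvHit, h1, h2, h3, if_true, Bool.false_eq_true, if_false]
        rcases hsp : (PySem.Str.splitMax? s ":" 1).bind (fun parts => PySem.List.pyGet? parts 1) with _ | part
        · simp
        · rcases hv : PySem.Int.ofStr? (PySem.Str.strip part) with _ | v
          · simp [hv]
          · simp only [hv, Option.some_or]
            rfl
      · simp only [pvHit, h1, h2, h3, Bool.false_eq_true, if_false]
        simp

-- the loop-body characterisation: A's fold keeps a 3-entry dict whose values are the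
-- forward "last some wins" folds
theorem pv_fold_char (l : List String) (a b c : Option Int) :
    l.foldl pvStepA
      (PySem.Dict.mk [("scanned", a), ("passed", b), ("safe_recommended", c)])
    = PySem.Dict.mk
        [("scanned", (l.map PySem.Str.strip).foldl (fun x s => (pvHit "Markets scanned:" s).or x) a),
         ("passed", (l.map PySem.Str.strip).foldl (fun x s => (pvHit "Markets passing filters:" s).or x) b),
         ("safe_recommended", (l.map PySem.Str.strip).foldl (fun x s => (pvHit "Safe recommended candidates:" s).or x) c)] := by
  induction l generalizing a b c with
  | nil => rfl
  | cons line rest ih =>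
      rw [List.foldl_cons, pv_stepA_mk]
      simp only [List.map_cons, List.foldl_cons]
      exact ih _ _ _

-- ===== VERDICT (by name: the statement is the Claim_ definition above) =====
theorem parse_rank_metrics_spec : Claim_equal_parse_rank_metrics := by
  intro r _
  unfold Spec_parse_rank_metrics
  have key := pv_fold_char (PySem.Str.splitlines r) none none none
  have h : parse_rank_metrics r
      = (PySem.Dict.mk
          [("scanned", ((PySem.Str.splitlines r).map PySem.Str.strip).foldl
              (fun x s => (pvHit "Markets scanned:" s).or x) none),
           ("passed", ((PySem.Str.splitlines r).map PySem.Str.strip).foldl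
              (fun x s => (pvHit "Markets passing filters:" s).or x) none),
           ("safe_recommended", ((PySem.Str.splitlines r).map PySem.Str.strip).foldl
              (fun x s => (pvHit "Safe recommended candidates:" s).or x) none)]).items :=
    congrArg PySem.Dict.items key
  rw [h]
  simp only [foldl_or_eq_lastValue, Option.or_none]
  rfl
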